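-- pv_equiv track=rewrite | github.com/ThomasRohde/pptx-cli | src/pptx_cli/core/markdown.py | looks_like_markdown
-- ===== SOURCE A (Python) =====
-- def looks_like_markdown(text: str) -> bool:
--     if "\n" not in text and "\r" not in text:
--         return False
--
--     for raw_line in text.splitlines():
--         stripped = raw_line.lstrip()
--         if not stripped:
--             continue
--         if stripped.startswith(("- ", "* ", "+ ", "#", "> ")):
--             return True
--         if _starts_with_ordered_list_marker(stripped):
--             return True
--     return False
--
-- def _starts_with_ordered_list_marker(text: str) -> bool:
--     marker = []
--     for character in text:
--         if character.isdigit():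
--             marker.append(character)
--             continue
--         if character in {".", ")"} and marker:
--             remainder = text[len(marker) + 1 :]
--             return remainder.startswith(" ")
--         return False
--     return False
-- ===== SOURCE B (Python) =====
-- def looks_like_markdown(text: str) -> bool:
--     if "\n" not in text and "\r" not in text:
--         return False
--     # Single left-to-right pass over the characters with a 4-state machine;
--     # newline characters reset the state, no line list is ever built.
--     START, NEED_SPACE, DIGITS, SKIP = 0, 1, 2, 3
--     state = START
--     for ch in text:
--         if ch == "\n" or ch == "\r":
--             state = START
--         elif state == START:
--             if ch == " " or ch == "\t":
--                 pass
--             elif ch == "#":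
--                 return True
--             elif ch in "-*+>":
--                 state = NEED_SPACE
--             elif ch.isdigit():
--                 state = DIGITS
--             else:
--                 state = SKIP
--         elif state == NEED_SPACE:
--             if ch == " ":
--                 return True
--             state = SKIP
--         elif state == DIGITS:
--             if ch.isdigit():
--                 pass
--             elif ch == "." or ch == ")":
--                 state = NEED_SPACE
--             else:
--                 state = SKIP
--     return False
-- ===== Notes on version B (the rewrite author's own statement) =====
-- stated objective: alternative
-- what changed: A splits the text into lines, lstrips each line and runs prefix tests plus a digit-accumulating helper per line; B never builds lines at all: it makes one left-to-right pass over the characters with a four-state machine (start/need-space/digits/skip) that newline characters reset, returning True the moment a marker is completed.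
import Mathlib
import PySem

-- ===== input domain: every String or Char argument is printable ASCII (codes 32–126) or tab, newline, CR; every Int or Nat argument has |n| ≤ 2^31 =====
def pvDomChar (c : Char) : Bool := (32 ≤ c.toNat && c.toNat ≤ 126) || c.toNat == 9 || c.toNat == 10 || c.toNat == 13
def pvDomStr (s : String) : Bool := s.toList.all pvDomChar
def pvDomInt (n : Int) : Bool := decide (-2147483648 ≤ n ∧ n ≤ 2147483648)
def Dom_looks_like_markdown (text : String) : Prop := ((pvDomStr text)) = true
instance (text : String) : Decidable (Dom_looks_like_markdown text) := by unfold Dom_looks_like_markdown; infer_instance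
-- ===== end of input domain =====

-- B replaces A's split-into-lines / lstrip-each-line / per-line prefix-and-marker scan by a
-- single left-to-right pass over the characters with a four-state machine; objective: alternative.

-- ===== PORT A =====
-- _starts_with_ordered_list_marker: loop over the characters of `text`, accumulating `marker`
def mdOrderedAux (text : List Char) (rest : List Char) (marker : List Char) : Bool :=
  match rest with
  | [] => false
  | c :: cs =>
    if PySem.Chars.isdigit c then
      mdOrderedAux text cs (marker ++ [c])
    else if (c == '.' || c == ')') && !marker.isEmpty then
      PySem.Chars.startswith (PySem.Chars.slice text (some ((marker.length : Int) + 1)) none) [' ']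
    else
      false

def starts_with_ordered_list_marker (text : List Char) : Bool :=
  mdOrderedAux text text []

-- the for-loop over splitlines with early return
def mdLinesLoop (lines : List (List Char)) : Bool :=
  match lines with
  | [] => false
  | l :: rest =>
    let stripped := PySem.Chars.lstrip l
    if stripped.isEmpty then mdLinesLoop rest
    else if PySem.Chars.startswith stripped "- ".toList
         || PySem.Chars.startswith stripped "* ".toList
         || PySem.Chars.startswith stripped "+ ".toList
         || PySem.Chars.startswith stripped "#".toList
         || PySem.Chars.startswith stripped "> ".toList then true
    else if starts_with_ordered_list_marker stripped then true
    else mdLinesLoop rest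

def looks_like_markdown (text : String) : Bool :=
  if !PySem.Chars.isIn ['\n'] text.toList && !PySem.Chars.isIn ['\r'] text.toList then
    false
  else
    mdLinesLoop (PySem.Chars.splitlines text.toList)

-- ===== PORT B =====
-- the four states of Source B's scanner (START, NEED_SPACE, DIGITS, SKIP)
inductive MdState
  | start
  | needSpace
  | digits
  | skip
deriving DecidableEq, Repr

-- the `for ch in text` loop of Source B: one step per character, newline resets to start
def mdScan (cs : List Char) (st : MdState) : Bool :=
  match cs with
  | [] => false
  | c :: rest =>
    if c == '\n' || c == '\r' then mdScan rest MdState.start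
    else
      match st with
      | MdState.start =>
        if c == ' ' || c == '\t' then mdScan rest MdState.start
        else if c == '#' then true
        else if c == '-' || c == '*' || c == '+' || c == '>' then mdScan rest MdState.needSpace
        else if PySem.Chars.isdigit c then mdScan rest MdState.digits
        else mdScan rest MdState.skip
      | MdState.needSpace =>
        if c == ' ' then true else mdScan rest MdState.skip
      | MdState.digits =>
        if PySem.Chars.isdigit c then mdScan rest MdState.digits
        else if c == '.' || c == ')' then mdScan rest MdState.needSpace
        else mdScan rest MdState.skip
      | MdState.skip => mdScan rest MdState.skip

def looks_like_markdown_alt (text : String) : Bool :=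
  if !PySem.Chars.isIn ['\n'] text.toList && !PySem.Chars.isIn ['\r'] text.toList then
    false
  else
    mdScan text.toList MdState.start

-- ===== PRECONDITION & SPEC =====
def Spec_looks_like_markdown (text : String) (out : Bool) : Prop := out = looks_like_markdown_alt text
instance (text : String) (out : Bool) : Decidable (Spec_looks_like_markdown text out) := by unfold Spec_looks_like_markdown; infer_instance

-- ===== CLAIM (what is proved, stated in full; the proofs are below) =====
def Claim_equal_looks_like_markdown : Prop := ∀ (text : String), Dom_looks_like_markdown text → Spec_looks_like_markdown text (looks_like_markdown text)

-- ===== LEMMAS AND PROOFS =====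

-- ---- character-level facts on the domain ----
lemma char_toNat_inj {c d : Char} : c = d ↔ c.toNat = d.toNat := by
  constructor
  · rintro rfl; rfl
  · intro h; exact Char.ext (UInt32.toNat_inj.mp h)

lemma char_beq (c d : Char) : (c == d) = decide (c.toNat = d.toNat) := by
  rw [Bool.eq_iff_iff]; simp [char_toNat_inj]

-- on the domain, the only whitespace inside a line is ' ' or '\t'
lemma dom_isspace_iff (c : Char) (h : pvDomChar c = true) (h1 : c ≠ '\n') (h2 : c ≠ '\r') :
    PySem.Chars.isspace c = true ↔ (c = ' ' ∨ c = '\t') := by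
  simp only [ne_eq, pvDomChar, PySem.Chars.isspace, char_toNat_inj, Bool.or_eq_true,
    Bool.and_eq_true, decide_eq_true_eq, beq_iff_eq,
    show (' ').toNat = 32 from rfl, show ('\t').toNat = 9 from rfl,
    show ('\n').toNat = 10 from rfl, show ('\r').toNat = 13 from rfl] at *
  omega

-- on the domain, splitlines' line-break test is exactly "newline or carriage return"
lemma dom_isB (c : Char) (h : pvDomChar c = true) :
    ((decide (c.toNat = 10) || decide (c.toNat = 13) || decide (c.toNat = 11) ||
      decide (c.toNat = 12) || decide (c.toNat = 28) || decide (c.toNat = 29) ||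
      decide (c.toNat = 30) || decide (c.toNat = 133) || decide (c.toNat = 8232) ||
      decide (c.toNat = 8233)) = (c == '\n' || c == '\r')) := by
  simp only [pvDomChar, Bool.or_eq_true, Bool.and_eq_true, decide_eq_true_eq, beq_iff_eq] at h
  rw [Bool.eq_iff_iff]
  simp only [char_beq, Bool.or_eq_true, decide_eq_true_eq,
    show ('\n').toNat = 10 from rfl, show ('\r').toNat = 13 from rfl]
  omega

-- ---- startswith on short literal prefixes ----
lemma sw1 (l : List Char) (p : Char) : PySem.Chars.startswith l [p] = (l.take 1 == [p]) := by
  rw [Bool.eq_iff_iff]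
  rcases l with _ | ⟨a, t⟩
  · simp [PySem.Chars.startswith]
  · simp [PySem.Chars.startswith_iff, List.cons_prefix_iff]

lemma sw2 (l : List Char) (p q : Char) : PySem.Chars.startswith l [p, q] = (l.take 2 == [p, q]) := by
  rw [Bool.eq_iff_iff]
  rcases l with _ | ⟨a, _ | ⟨b, u⟩⟩
  · simp [PySem.Chars.startswith]
  · simp [PySem.Chars.startswith, List.isPrefixOf]
  · simp [PySem.Chars.startswith_iff, List.cons_prefix_iff]

-- ---- a clean per-line marker predicate, shared meeting point of the two proofs ----
def ordFrom : List Char → Bool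
  | [] => false
  | c :: cs =>
    if PySem.Chars.isdigit c then ordFrom cs
    else if c == '.' || c == ')' then cs.take 1 == [' ']
    else false

def isM : List Char → Bool
  | [] => false
  | c :: cs =>
    if c == '#' then true
    else if c == '-' || c == '*' || c == '+' || c == '>' then cs.take 1 == [' ']
    else if PySem.Chars.isdigit c then ordFrom cs
    else false

-- ---- A-side: each line's test equals isM of the stripped line ----
lemma auxOrd (rest : List Char) : ∀ marker : List Char, marker ≠ [] →
    (∀ c ∈ marker, PySem.Chars.isdigit c = true) →
    mdOrderedAux (marker ++ rest) rest marker = ordFrom rest := by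
  induction rest with
  | nil => intro marker _ _; simp [mdOrderedAux, ordFrom]
  | cons c cs ih =>
    intro marker hne hm
    by_cases hd : PySem.Chars.isdigit c = true
    · rw [show mdOrderedAux (marker ++ c :: cs) (c :: cs) marker
          = mdOrderedAux (marker ++ c :: cs) cs (marker ++ [c]) by simp [mdOrderedAux, hd]]
      rw [show marker ++ c :: cs = (marker ++ [c]) ++ cs by simp]
      rw [ih (marker ++ [c]) (by simp) ?_]
      · simp [ordFrom, hd]
      · intro x hx
        rcases List.mem_append.mp hx with h | h
        · exact hm x h
        · simp at h; subst h; exact hd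
    · have hme : marker.isEmpty = false := by simpa [List.isEmpty_iff] using hne
      by_cases hp : (c == '.' || c == ')') = true
      · have hdrop1 : (marker ++ c :: cs).drop (marker.length + 1) = cs := by
          rw [show marker ++ c :: cs = (marker ++ [c]) ++ cs by simp,
            show marker.length + 1 = (marker ++ [c]).length by simp]
          simp
        have hsl : PySem.Chars.slice (marker ++ c :: cs) (some ((marker.length : Int) + 1)) none
            = cs := by
          rw [show ((marker.length : Int) + 1) = ((marker.length + 1 : ℕ) : Int) by push_cast; ring]
          rw [PySem.Chars.slice_eq_listSlice, PySem.List.slice_from_natCast, hdrop1]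
        rw [show mdOrderedAux (marker ++ c :: cs) (c :: cs) marker
            = PySem.Chars.startswith
                (PySem.Chars.slice (marker ++ c :: cs) (some ((marker.length : Int) + 1)) none) [' ']
            by simp [mdOrderedAux, hd, hp, hme]]
        rw [hsl, sw1]
        simp [ordFrom, hd, hp]
      · simp [mdOrderedAux, hd, hp, ordFrom, hme]

lemma ordTop (c : Char) (cs : List Char) (h : PySem.Chars.isdigit c = true) :
    starts_with_ordered_list_marker (c :: cs) = ordFrom cs := by
  unfold starts_with_ordered_list_marker
  rw [show mdOrderedAux (c :: cs) (c :: cs) [] = mdOrderedAux (c :: cs) cs [c] by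
    simp [mdOrderedAux, h]]
  exact auxOrd cs [c] (by simp) (by simpa using h)

lemma lineA_eq (s : List Char) :
    (PySem.Chars.startswith s "- ".toList
     || PySem.Chars.startswith s "* ".toList
     || PySem.Chars.startswith s "+ ".toList
     || PySem.Chars.startswith s "#".toList
     || PySem.Chars.startswith s "> ".toList
     || starts_with_ordered_list_marker s) = isM s := by
  rcases s with _ | ⟨c, cs⟩
  · simp [starts_with_ordered_list_marker, mdOrderedAux, isM, PySem.Chars.startswith]
  · rw [show "- ".toList = ['-', ' '] from rfl, show "* ".toList = ['*', ' '] from rfl,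
      show "+ ".toList = ['+', ' '] from rfl, show "#".toList = ['#'] from rfl,
      show "> ".toList = ['>', ' '] from rfl, sw2, sw2, sw2, sw1, sw2]
    have e : ∀ d : Char, ((c :: cs).take 2 == [d, ' ']) = ((c == d) && (cs.take 1 == [' '])) := by
      intro d
      cases cs <;> simp [List.take]
    have e1 : ((c :: cs).take 1 == [('#' : Char)]) = (c == '#') := by simp [List.take]
    rw [e, e, e, e, e1]
    by_cases hh : c = '#'
    · subst hh
      simp [isM]
    · have hh' : (c == '#') = false := by simp [hh]
      by_cases hd : PySem.Chars.isdigit c = true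
      · have hb : ∀ d : Char, d ∈ ['-', '*', '+', '>'] → (c == d) = false := by
          intro d hdm
          rw [beq_eq_false_iff_ne]
          rintro rfl
          fin_cases hdm <;> exact absurd hd (by decide)
      
        rw [hb '-' (by simp), hb '*' (by simp), hb '+' (by simp), hb '>' (by simp), hh',
          ordTop c cs hd]
        have hbul : (c == '-' || c == '*' || c == '+' || c == '>') = false := by
          simp [hb '-' (by simp), hb '*' (by simp), hb '+' (by simp), hb '>' (by simp)]
        simp [isM, hh', hbul, hd]
      · have hord : starts_with_ordered_list_marker (c :: cs) = false := by
          simp [starts_with_ordered_list_marker, mdOrderedAux, hd]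
        rw [hord, hh']
        have key : ∀ a b c' d t : Bool,
            (((((a && t || b && t) || c' && t) || false) || d && t) || false)
              = (if (a || b || c' || d) = true then t else false) := by decide
        rw [key]
        simp only [isM, hh', Bool.false_eq_true, if_false, hd]

lemma pvIteOr (a b x : Bool) : (if a = true then true else if b = true then true else x) = ((a || b) || x) := by
  cases a <;> cases b <;> simp

lemma loop_eq (lines : List (List Char)) :
    mdLinesLoop lines = lines.any (fun l => isM (PySem.Chars.lstrip l)) := by
  induction lines with
  | nil => simp [mdLinesLoop]
  | cons l rest ih =>
    simp only [mdLinesLoop, List.any_cons]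
    rw [ih]
    by_cases h : (PySem.Chars.lstrip l).isEmpty = true
    · have he : PySem.Chars.lstrip l = [] := by simpa [List.isEmpty_iff] using h
      simp [he, isM]
    · rw [if_neg h, pvIteOr, lineA_eq]

-- ---- B-side: the state machine, factored through a per-character step function ----
def stepSt : MdState → Char → Option MdState
  | MdState.start, c =>
    if c == ' ' || c == '\t' then some MdState.start
    else if c == '#' then none
    else if c == '-' || c == '*' || c == '+' || c == '>' then some MdState.needSpace
    else if PySem.Chars.isdigit c then some MdState.digits
    else some MdState.skip
  | MdState.needSpace, c => if c == ' ' then none else some MdState.skip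
  | MdState.digits, c =>
    if PySem.Chars.isdigit c then some MdState.digits
    else if c == '.' || c == ')' then some MdState.needSpace
    else some MdState.skip
  | MdState.skip, _ => some MdState.skip

-- scanP st l = the state after scanning the newline-free chars l, none = "returned True"
def scanP : MdState → List Char → Option MdState
  | st, [] => some st
  | st, c :: cs =>
    match stepSt st c with
    | none => none
    | some st' => scanP st' cs

lemma mdScan_cons (c : Char) (cs : List Char) (st : MdState)
    (h : (c == '\n' || c == '\r') = false) :
    mdScan (c :: cs) st = (match stepSt st c with
      | none => true
      | some st' => mdScan cs st') := by
  cases st <;> simp only [mdScan, h, Bool.false_eq_true, if_false, stepSt] <;>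
    first
      | rfl
      | (split_ifs <;> rfl)

lemma scanP_append (p : List Char) : ∀ (q : List Char) (st : MdState),
    scanP st (p ++ q) = (match scanP st p with
      | none => none
      | some st' => scanP st' q) := by
  induction p with
  | nil => intro q st; rfl
  | cons c cs ih =>
    intro q st
    show scanP st (c :: (cs ++ q)) = _
    simp only [scanP]
    cases stepSt st c with
    | none => rfl
    | some st' => exact ih q st'

lemma scanP_skip (l : List Char) : scanP MdState.skip l = some MdState.skip := by
  induction l with
  | nil => rfl
  | cons c cs ih => simpa [scanP, stepSt] using ih

lemma scanP_needSpace (l : List Char) : scanP MdState.needSpace l = none ↔ l.take 1 = [' '] := by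
  rcases l with _ | ⟨c, cs⟩
  · simp [scanP]
  · by_cases hc : c = ' '
    · subst hc; simp [scanP, stepSt]
    · have : (c == ' ') = false := by simp [hc]
      simp [scanP, stepSt, this, scanP_skip, List.take, hc]

lemma scanP_digits (l : List Char) : scanP MdState.digits l = none ↔ ordFrom l = true := by
  induction l with
  | nil => simp [scanP, ordFrom]
  | cons c cs ih =>
    by_cases hd : PySem.Chars.isdigit c = true
    · simp only [scanP, stepSt, hd, if_true, ordFrom]
      exact ih
    · by_cases hp : (c == '.' || c == ')') = true
      · simp only [scanP, stepSt, hd, Bool.false_eq_true, if_false, hp, if_true, ordFrom]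
        rw [scanP_needSpace]
        simp
      · simp [scanP, stepSt, hd, hp, scanP_skip, ordFrom]

-- within one line (domain chars, no newlines), "the scanner fires" = "isM of the stripped line"
lemma scan_line_iff (l : List Char)
    (h : ∀ c ∈ l, pvDomChar c = true ∧ c ≠ '\n' ∧ c ≠ '\r') :
    scanP MdState.start l = none ↔ isM (PySem.Chars.lstrip l) = true := by
  induction l with
  | nil => simp [scanP, PySem.Chars.lstrip, isM]
  | cons c cs ih =>
    obtain ⟨hdc, hn1, hn2⟩ := h c (by simp)
    have hcs : ∀ c' ∈ cs, pvDomChar c' = true ∧ c' ≠ '\n' ∧ c' ≠ '\r' :=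
      fun c' hc' => h c' (List.mem_cons_of_mem _ hc')
    by_cases hsp : PySem.Chars.isspace c = true
    · have hst : (c == ' ' || c == '\t') = true := by
        rcases (dom_isspace_iff c hdc hn1 hn2).mp hsp with h' | h' <;> simp [h']
      have hls : PySem.Chars.lstrip (c :: cs) = PySem.Chars.lstrip cs := by
        simp [PySem.Chars.lstrip, hsp]
      rw [hls]
      rw [show scanP MdState.start (c :: cs) = scanP MdState.start cs by
        simp [scanP, stepSt, hst]]
      exact ih hcs
    · have hls : PySem.Chars.lstrip (c :: cs) = c :: cs := by
        simp [PySem.Chars.lstrip, hsp]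
      rw [hls]
      have hst : (c == ' ' || c == '\t') = false := by
        refine Bool.or_eq_false_iff.mpr ⟨?_, ?_⟩ <;>
          · rw [beq_eq_false_iff_ne]
            rintro rfl
            exact hsp (by decide)
      by_cases hh : c = '#'
      · subst hh
        simp [scanP, stepSt, isM]
      · have hh' : (c == '#') = false := by simp [hh]
        by_cases hb : (c == '-' || c == '*' || c == '+' || c == '>') = true
        · rw [show scanP MdState.start (c :: cs) = scanP MdState.needSpace cs by
            simp [scanP, stepSt, hst, hh', hb]]
          rw [scanP_needSpace]
          simp only [isM, hh', Bool.false_eq_true, if_false, hb, if_true, beq_iff_eq]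
        · by_cases hd : PySem.Chars.isdigit c = true
          · rw [show scanP MdState.start (c :: cs) = scanP MdState.digits cs by
              simp [scanP, stepSt, hst, hh', hb, hd]]
            rw [scanP_digits]
            simp only [isM, hh', Bool.false_eq_true, if_false, hb, hd, if_true]
          · rw [show scanP MdState.start (c :: cs) = scanP MdState.skip cs by
              simp [scanP, stepSt, hst, hh', hb, hd]]
            rw [scanP_skip]
            simp [isM, hh', hb, hd]

-- ---- the line structure of the input: split at every '\n' / '\r' ----
-- (splitting '\r\n' into two breaks only inserts an empty line, which no marker test accepts)
def pvLines : List Char → List Char → List (List Char)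
  | [], cur => if cur.isEmpty then [] else [cur.reverse]
  | c :: rest, cur =>
    if c == '\n' || c == '\r' then cur.reverse :: pvLines rest []
    else pvLines rest (c :: cur)

lemma Ltrue (cs : List Char) : ∀ cur : List Char,
    (∀ c ∈ cs, pvDomChar c = true) →
    (∀ c ∈ cur, pvDomChar c = true ∧ c ≠ '\n' ∧ c ≠ '\r') →
    scanP MdState.start cur.reverse = none →
    (pvLines cs cur).any (fun l => isM (PySem.Chars.lstrip l)) = true := by
  induction cs with
  | nil =>
    intro cur _ hcur hnone
    have hne : cur ≠ [] := by
      rintro rfl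
      simp [scanP] at hnone
    have : cur.isEmpty = false := by simpa [List.isEmpty_iff] using hne
    simp only [pvLines, this, Bool.false_eq_true, if_false, List.any_cons, List.any_nil,
      Bool.or_false]
    exact (scan_line_iff cur.reverse (fun c hc => hcur c (List.mem_reverse.mp hc))).mp hnone
  | cons c rest ih =>
    intro cur hcs hcur hnone
    have hcs' : ∀ c' ∈ rest, pvDomChar c' = true := fun c' hc' => hcs c' (List.mem_cons_of_mem _ hc')
    by_cases hnl : (c == '\n' || c == '\r') = true
    · simp only [pvLines, hnl, if_true, List.any_cons]
      rw [(scan_line_iff cur.reverse (fun c hc => hcur c (List.mem_reverse.mp hc))).mp hnone]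
      rfl
    · simp only [pvLines, hnl, Bool.false_eq_true, if_false]
      refine ih (c :: cur) hcs' ?_ ?_
      · intro c' hc'
        rcases List.mem_cons.mp hc' with rfl | hc'
        · refine ⟨hcs c' (by simp), ?_, ?_⟩ <;>
            · rintro rfl
              simp at hnl
        · exact hcur c' hc'
      · rw [show (c :: cur).reverse = cur.reverse ++ [c] by simp, scanP_append, hnone]

lemma scan_lines (cs : List Char) : ∀ (cur : List Char) (st : MdState),
    (∀ c ∈ cs, pvDomChar c = true) →
    (∀ c ∈ cur, pvDomChar c = true ∧ c ≠ '\n' ∧ c ≠ '\r') →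
    scanP MdState.start cur.reverse = some st →
    mdScan cs st = (pvLines cs cur).any (fun l => isM (PySem.Chars.lstrip l)) := by
  induction cs with
  | nil =>
    intro cur st _ hcur hsome
    simp only [mdScan, pvLines]
    by_cases he : cur.isEmpty
    · simp [he]
    · have hfalse : isM (PySem.Chars.lstrip cur.reverse) = false := by
        rw [← Bool.not_eq_true]
        intro htrue
        have := (scan_line_iff cur.reverse (fun c hc => hcur c (List.mem_reverse.mp hc))).mpr htrue
        rw [hsome] at this
        exact absurd this (Option.some_ne_none st)
      simp [he, hfalse]
  | cons c rest ih =>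
    intro cur st hcs hcur hsome
    have hcs' : ∀ c' ∈ rest, pvDomChar c' = true := fun c' hc' => hcs c' (List.mem_cons_of_mem _ hc')
    have hfalse : isM (PySem.Chars.lstrip cur.reverse) = false := by
      rw [← Bool.not_eq_true]
      intro htrue
      have := (scan_line_iff cur.reverse (fun c hc => hcur c (List.mem_reverse.mp hc))).mpr htrue
      rw [hsome] at this
      exact absurd this (Option.some_ne_none st)
    by_cases hnl : (c == '\n' || c == '\r') = true
    · rw [show mdScan (c :: rest) st = mdScan rest MdState.start by
        cases st <;> simp [mdScan, hnl]]
      simp only [pvLines, hnl, if_true, List.any_cons, hfalse, Bool.false_or]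
      exact ih [] MdState.start hcs' (by simp) rfl
    · have hnl' : (c == '\n' || c == '\r') = false := by simpa using hnl
      rw [mdScan_cons c rest st hnl']
      have hcur' : ∀ c' ∈ c :: cur, pvDomChar c' = true ∧ c' ≠ '\n' ∧ c' ≠ '\r' := by
        intro c' hc'
        rcases List.mem_cons.mp hc' with rfl | hc'
        · refine ⟨hcs c' (by simp), ?_, ?_⟩ <;>
            · rintro rfl
              simp at hnl
        · exact hcur c' hc'
      have happ : scanP MdState.start (c :: cur).reverse
          = (match stepSt st c with
             | none => none
             | some st' => some st') := by
        rw [show (c :: cur).reverse = cur.reverse ++ [c] by simp, scanP_append, hsome]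
        show scanP st [c] = _
        cases h : stepSt st c <;> simp [scanP, h]
      simp only [pvLines, hnl', Bool.false_eq_true, if_false]
      cases hstep : stepSt st c with
      | none =>
        rw [hstep] at happ
        exact (Ltrue rest (c :: cur) hcs' hcur' happ).symm
      | some st' =>
        rw [hstep] at happ
        exact ih (c :: cur) st' hcs' hcur' happ

-- ---- splitlines agrees with pvLines up to empty lines ----
lemma goAny (isB : Char → Bool)
    (hB : ∀ c, pvDomChar c = true → isB c = (c == '\n' || c == '\r')) :
    ∀ (cs cur : List Char) (acc : List (List Char)),
    (∀ c ∈ cs, pvDomChar c = true) →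
    (PySem.Chars.splitlines.go isB cs cur acc).any (fun l => isM (PySem.Chars.lstrip l))
      = (acc.any (fun l => isM (PySem.Chars.lstrip l))
         || (pvLines cs cur).any (fun l => isM (PySem.Chars.lstrip l))) := by
  intro cs cur acc
  induction cs, cur, acc using PySem.Chars.splitlines.go.induct (isB := isB) with
  | case1 cur acc he =>
    intro _
    simp [PySem.Chars.splitlines.go.eq_1, pvLines, List.isEmpty_iff.mp he,
      List.any_reverse]
  | case2 cur acc he =>
    intro _
    have : cur.isEmpty = false := by simpa using he
    simp [PySem.Chars.splitlines.go.eq_1, this, pvLines, List.any_reverse, Bool.or_comm]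
  | case3 rest cur acc ih =>
    intro hdom
    have hdom' : ∀ c ∈ rest, pvDomChar c = true := by
      intro c hc
      exact hdom c (by simp [hc])
    rw [PySem.Chars.splitlines.go.eq_2, ih hdom']
    simp only [pvLines, show (('\r' : Char) == '\n' || ('\r' : Char) == '\r') = true by decide,
      show (('\n' : Char) == '\n' || ('\n' : Char) == '\r') = true by decide, if_true,
      List.any_cons, List.reverse_nil, show isM (PySem.Chars.lstrip ([] : List Char)) = false from rfl,
      Bool.false_or]
    cases acc.any (fun l => isM (PySem.Chars.lstrip l)) <;>
      cases isM (PySem.Chars.lstrip cur.reverse) <;> simp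
  | case4 c rest cur acc hpat hB' ih =>
    intro hdom
    have hdc : pvDomChar c = true := hdom c (by simp)
    have hdom' : ∀ c ∈ rest, pvDomChar c = true := fun c' hc' => hdom c' (by simp [hc'])
    have hnl : (c == '\n' || c == '\r') = true := by rw [← hB c hdc]; exact hB'
    rw [PySem.Chars.splitlines.go.eq_3 isB cur acc c rest hpat, if_pos hB', ih hdom']
    simp only [pvLines, hnl, if_true, List.any_cons]
    cases acc.any (fun l => isM (PySem.Chars.lstrip l)) <;>
      cases isM (PySem.Chars.lstrip cur.reverse) <;> simp
  | case5 c rest cur acc hpat hB' ih =>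
    intro hdom
    have hdc : pvDomChar c = true := hdom c (by simp)
    have hdom' : ∀ c ∈ rest, pvDomChar c = true := fun c' hc' => hdom c' (by simp [hc'])
    have hnl : (c == '\n' || c == '\r') = false := by
      rw [← hB c hdc]; simpa using hB'
    rw [PySem.Chars.splitlines.go.eq_3 isB cur acc c rest hpat,
      if_neg (by simpa using hB'), ih hdom']
    simp [pvLines, hnl]

-- ===== VERDICT (by name: the statement is the Claim_ definition above) =====
theorem looks_like_markdown_spec : Claim_equal_looks_like_markdown := by
  intro text hdom
  unfold Spec_looks_like_markdown looks_like_markdown looks_like_markdown_alt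
  have hdomL : ∀ c ∈ text.toList, pvDomChar c = true := by
    unfold Dom_looks_like_markdown pvDomStr at hdom
    simpa [List.all_eq_true] using hdom
  by_cases hg : (!PySem.Chars.isIn ['\n'] text.toList && !PySem.Chars.isIn ['\r'] text.toList) = true
  · rw [if_pos hg, if_pos hg]
  · rw [if_neg hg, if_neg hg, loop_eq]
    rw [show PySem.Chars.splitlines text.toList
        = PySem.Chars.splitlines.go
            (fun c =>
              decide (c.toNat = 10) || decide (c.toNat = 13) || decide (c.toNat = 11) ||
                decide (c.toNat = 12) || decide (c.toNat = 28) || decide (c.toNat = 29) ||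
                decide (c.toNat = 30) || decide (c.toNat = 133) || decide (c.toNat = 8232) ||
                decide (c.toNat = 8233))
            text.toList [] [] from rfl]
    rw [goAny _ (fun c h => dom_isB c h) text.toList [] [] hdomL]
    rw [scan_lines text.toList [] MdState.start hdomL (by simp) rfl]
    simp
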